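-- pv_equiv track=rewrite | github.com/chris4540/StudyMaskedLMForQG | src/utils/data/datasets/__init__.py | find_idx_of_span_in
-- ===== SOURCE A (Python) =====
-- def find_idx_of_span_in(doc_tokens, span_toks):
--     assert len(span_toks) >= 1
--     max_j = len(span_toks)
--     max_i = len(doc_tokens)
--     ret = list()
--
--     i = 0
--     while i < max_i:
--         if doc_tokens[i:i+max_j] == span_toks:
--             ret.extend([k for k in range(i, i+max_j)])
--             i += max_j
--         else:
--             i += 1
--     return ret
-- ===== SOURCE B (Python) =====
-- def find_idx_of_span_in(doc_tokens, span_toks):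
--     # Two-phase: collect every (possibly overlapping) occurrence start,
--     # then greedily keep non-overlapping ones and expand to index ranges.
--     m = len(span_toks)
--     starts = [i for i in range(len(doc_tokens)) if doc_tokens[i:i+m] == span_toks]
--     ret = []
--     nxt = 0
--     for i in starts:
--         if nxt <= i:
--             ret.extend(range(i, i + m))
--             nxt = i + m
--     return ret
-- ===== Notes on version B (the rewrite author's own statement) =====
-- stated objective: alternative
-- what changed: A fuses matching and selection in one while loop that jumps past each match; B first enumerates all (including overlapping) occurrence starts with a comprehension, then a separate greedy pass keeps the non-overlapping ones and expands them to index ranges.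
-- outside the precondition, e.g. on find_idx_of_span_in(['a'], []): A raises AssertionError, B returns []
import Mathlib
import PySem

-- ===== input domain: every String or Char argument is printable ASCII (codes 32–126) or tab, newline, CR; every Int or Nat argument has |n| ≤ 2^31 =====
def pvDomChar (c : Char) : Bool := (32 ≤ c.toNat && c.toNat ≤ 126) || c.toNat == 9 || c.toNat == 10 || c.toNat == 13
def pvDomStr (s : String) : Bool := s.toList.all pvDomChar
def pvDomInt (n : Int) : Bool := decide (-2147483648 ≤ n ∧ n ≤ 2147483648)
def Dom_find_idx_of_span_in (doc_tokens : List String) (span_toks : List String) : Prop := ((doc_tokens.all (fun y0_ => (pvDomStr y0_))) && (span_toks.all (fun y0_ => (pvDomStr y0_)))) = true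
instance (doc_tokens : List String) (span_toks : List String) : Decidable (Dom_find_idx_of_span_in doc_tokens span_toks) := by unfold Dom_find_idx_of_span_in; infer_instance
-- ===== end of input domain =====

-- B replaces A's fused match-and-jump while loop by two phases (enumerate all occurrence
-- starts, then a greedy non-overlap pass); alternative decomposition, same asymptotic cost.


-- ===== PORT A =====
-- A's while loop; fuel = doc.length bounds the iteration count (i grows by ≥ 1 per step
-- whenever span_toks ≠ [], which Pre_ guarantees). Nat counters stand for Python's
-- nonnegative ints; doc_tokens[i:i+max_j] is PySem.List.slice, range(i, i+max_j) is pyRange.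
def pvALoop (doc_tokens span_toks : List String) (max_j : Nat) : Nat → Nat → List Int
  | 0, _ => []
  | fuel + 1, i =>
    if i < doc_tokens.length then
      if PySem.List.slice doc_tokens (some (i : Int)) (some ((i : Int) + (max_j : Int))) = span_toks then
        PySem.List.pyRange (i : Int) ((i : Int) + (max_j : Int)) 1 ++
          pvALoop doc_tokens span_toks max_j fuel (i + max_j)
      else pvALoop doc_tokens span_toks max_j fuel (i + 1)
    else []

def find_idx_of_span_in (doc_tokens : List String) (span_toks : List String) : List Int :=
  pvALoop doc_tokens span_toks span_toks.length doc_tokens.length 0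

-- ===== PORT B =====
-- Source B: comprehension collecting all occurrence starts, then a greedy fold.
def find_idx_of_span_in_alt (doc_tokens : List String) (span_toks : List String) : List Int :=
  let m := span_toks.length
  let starts : List Nat := (List.range doc_tokens.length).filter
    (fun (i : Nat) => decide (PySem.List.slice doc_tokens (some (i : Int)) (some ((i : Int) + (m : Int))) = span_toks))
  (starts.foldl
    (fun st i =>
      if st.1 ≤ i then (i + m, st.2 ++ PySem.List.pyRange (i : Int) ((i : Int) + (m : Int)) 1) else st)
    (0, ([] : List Int))).2

-- ===== PRECONDITION & SPEC =====
-- A asserts len(span_toks) >= 1: on an empty span A raises AssertionError, so it is excluded.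
def Pre_find_idx_of_span_in (doc_tokens : List String) (span_toks : List String) : Prop :=
  span_toks ≠ []
instance (doc_tokens : List String) (span_toks : List String) : Decidable (Pre_find_idx_of_span_in doc_tokens span_toks) := by unfold Pre_find_idx_of_span_in; infer_instance

def pvWitness_find_idx_of_span_in : List String × List String := (["a", "b", "a"], ["a"])

def Spec_find_idx_of_span_in (doc_tokens : List String) (span_toks : List String) (out : List Int) : Prop := out = find_idx_of_span_in_alt doc_tokens span_toks
instance (doc_tokens : List String) (span_toks : List String) (out : List Int) : Decidable (Spec_find_idx_of_span_in doc_tokens span_toks out) := by unfold Spec_find_idx_of_span_in; infer_instance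

-- ===== CLAIM (what is proved, stated in full; the proofs are below) =====
def Claim_equal_find_idx_of_span_in : Prop := ∀ (doc_tokens : List String) (span_toks : List String), Dom_find_idx_of_span_in doc_tokens span_toks → Pre_find_idx_of_span_in doc_tokens span_toks → Spec_find_idx_of_span_in doc_tokens span_toks (find_idx_of_span_in doc_tokens span_toks)

-- ===== LEMMAS AND PROOFS =====

-- the occurrence test shared by the reasoning (B's comprehension predicate)
def pvP (doc_tokens span_toks : List String) (m : Nat) (i : Nat) : Bool :=
  decide (PySem.List.slice doc_tokens (some (i : Int)) (some ((i : Int) + (m : Int))) = span_toks)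

-- recursive form of B's greedy fold (emission only; matching already done)
def pvBGo (m : Nat) : List Nat → Nat → List Int
  | [], _ => []
  | s :: r, nxt =>
    if nxt ≤ s then PySem.List.pyRange (s : Int) ((s : Int) + (m : Int)) 1 ++ pvBGo m r (s + m)
    else pvBGo m r nxt

theorem pvBGo_foldl (m : Nat) (l : List Nat) (nxt : Nat) (acc : List Int) :
    (l.foldl
      (fun st i =>
        if st.1 ≤ i then (i + m, st.2 ++ PySem.List.pyRange (i : Int) ((i : Int) + (m : Int)) 1) else st)
      (nxt, acc)).2 = acc ++ pvBGo m l nxt := by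
  induction l generalizing nxt acc with
  | nil => simp [pvBGo]
  | cons s r ih =>
    by_cases h : nxt ≤ s <;> simp [pvBGo, h, ih, List.append_assoc]

theorem pvBGo_skip (m : Nat) (l1 l2 : List Nat) (nxt : Nat) (h : ∀ s ∈ l1, s < nxt) :
    pvBGo m (l1 ++ l2) nxt = pvBGo m l2 nxt := by
  induction l1 with
  | nil => rfl
  | cons s r ih =>
    have hs : s < nxt := h s (by simp)
    simp only [List.cons_append, pvBGo, if_neg (by omega : ¬ nxt ≤ s)]
    exact ih (fun t ht => h t (by simp [ht]))

theorem pvBGo_mono (m : Nat) (l : List Nat) (n1 n2 : Nat)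
    (h1 : ∀ s ∈ l, n1 ≤ s) (h2 : ∀ s ∈ l, n2 ≤ s) :
    pvBGo m l n1 = pvBGo m l n2 := by
  cases l with
  | nil => rfl
  | cons s r =>
    simp only [pvBGo, if_pos (h1 s (by simp)), if_pos (h2 s (by simp))]

theorem pvMain (doc_tokens span_toks : List String) (m : Nat) (hm : 1 ≤ m) :
    ∀ (fuel i : Nat), doc_tokens.length ≤ i + fuel →
      pvALoop doc_tokens span_toks m fuel i =
        pvBGo m ((List.range' i (doc_tokens.length - i)).filter (pvP doc_tokens span_toks m)) i := by
  intro fuel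
  induction fuel with
  | zero =>
    intro i h
    have : doc_tokens.length - i = 0 := by omega
    simp [pvALoop, this, pvBGo]
  | succ fuel ih =>
    intro i h
    set n := doc_tokens.length with hn
    by_cases hi : i < n
    · have hsplit : n - i = (n - (i + 1)) + 1 := by omega
      rw [pvALoop, if_pos hi, hsplit, List.range'_succ]
      by_cases hp : PySem.List.slice doc_tokens (some (i : Int)) (some ((i : Int) + (m : Int))) = span_toks
      · have hpb : pvP doc_tokens span_toks m i = true := by simp [pvP, hp]
        rw [if_pos hp, List.filter_cons_of_pos hpb, pvBGo, if_pos (le_refl i)]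
        congr 1
        by_cases hle : i + m ≤ n
        · -- split the tail range at i+m
          have hsp : List.range' (i + 1) (n - (i + 1)) =
              List.range' (i + 1) (m - 1) ++ List.range' (i + m) (n - (i + m)) := by
            have hra := @List.range'_append (i + 1) (m - 1) (n - (i + m)) 1
            rw [show i + 1 + 1 * (m - 1) = i + m by omega,
                show (m - 1) + (n - (i + m)) = n - (i + 1) by omega] at hra
            exact hra.symm
          rw [hsp, List.filter_append, pvBGo_skip]
          · exact ih (i + m) (by omega)
          · intro s hs
            have := List.mem_range'.mp (List.mem_of_mem_filter hs)
            omega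
        · -- match runs past the end: both sides emit nothing more
          have htail : pvBGo m ((List.range' (i + 1) (n - (i + 1))).filter (pvP doc_tokens span_toks m)) (i + m) = [] := by
            rw [← List.append_nil ((List.range' (i + 1) (n - (i + 1))).filter (pvP doc_tokens span_toks m))]
            rw [pvBGo_skip]
            · rfl
            · intro s hs
              have := List.mem_range'.mp (List.mem_of_mem_filter hs)
              omega
          rw [htail, ih (i + m) (by omega)]
          have : n - (i + m) = 0 := by omega
          simp [this, pvBGo]
      · have hpb : pvP doc_tokens span_toks m i = false := by simp [pvP, hp]
        rw [if_neg hp, List.filter_cons_of_neg (by simp [hpb]), ih (i + 1) (by omega)]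
        apply pvBGo_mono
        · intro s hs
          have := List.mem_range'.mp (List.mem_of_mem_filter hs)
          omega
        · intro s hs
          have := List.mem_range'.mp (List.mem_of_mem_filter hs)
          omega
    · have : n - i = 0 := by omega
      rw [pvALoop, if_neg hi]
      simp [this, pvBGo]

-- ===== VERDICT (by name: the statement is the Claim_ definition above) =====
theorem find_idx_of_span_in_spec : Claim_equal_find_idx_of_span_in := by
  intro doc span _ hpre
  unfold Spec_find_idx_of_span_in find_idx_of_span_in find_idx_of_span_in_alt
  have hm : 1 ≤ span.length := by
    cases span with
    | nil => exact absurd rfl hpre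
    | cons a l => simp
  rw [pvMain doc span span.length hm doc.length 0 (by omega)]
  rw [pvBGo_foldl]
  simp only [List.nil_append, List.range_eq_range']
  rfl
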